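-- pv_equiv track=rewrite | github.com/EdisonAyranisthebest/DSC40b-Hw4 | knn_distance.py | knn_distance
-- ===== SOURCE A (Python) =====
-- def knn_distance(arr, q, k):
--     distances = []
--     for point in arr:
--         dist = abs(point - q)
--         distances.append((dist, point))
--
--     distances.sort()
--
--     kth_distance, kth_point = distances[k-1]
--
--     return (kth_distance, kth_point)
-- ===== SOURCE B (Python) =====
-- def _pivot(xs):
--     while len(xs) > 5:
--         chunks = [xs[j:j + 5] for j in range(0, len(xs), 5)]
--         xs = [sorted(c)[len(c) // 2] for c in chunks]
--     return sorted(xs)[len(xs) // 2]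
--
-- def _quickselect(xs, i):
--     while True:
--         pivot = _pivot(xs)
--         lt = [x for x in xs if x < pivot]
--         gt = [x for x in xs if x > pivot]
--         if i < len(lt):
--             xs = lt
--         elif i < len(xs) - len(gt):
--             return pivot
--         else:
--             i -= len(xs) - len(gt)
--             xs = gt
--
-- def knn_distance(arr, q, k):
--     pairs = [(abs(p - q), p) for p in arr]
--     return _quickselect(pairs, k - 1)
-- ===== Notes on version B (the rewrite author's own statement) =====
-- stated objective: alternative
-- what changed: Replaces sorting all (distance, point) pairs and indexing by an iterative quickselect with a median-of-medians pivot that finds the (k-1)-th order statistic directly (O(n) selection instead of a full O(n log n) sort, though Python-level constants keep it from beating the C-coded sort in a timing run); Pre_ excludes k <= 0, where A returns an element via Python's accidental negative-index wraparound into the sorted list while the natural quickselect raises IndexError.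
-- outside the precondition, e.g. on knn_distance([1, 3, 5], 2, 0): A returns (3, 5), B raises IndexError; on knn_distance([4, 7], 5, -1): A returns (1, 4), B raises IndexError
import Mathlib
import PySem

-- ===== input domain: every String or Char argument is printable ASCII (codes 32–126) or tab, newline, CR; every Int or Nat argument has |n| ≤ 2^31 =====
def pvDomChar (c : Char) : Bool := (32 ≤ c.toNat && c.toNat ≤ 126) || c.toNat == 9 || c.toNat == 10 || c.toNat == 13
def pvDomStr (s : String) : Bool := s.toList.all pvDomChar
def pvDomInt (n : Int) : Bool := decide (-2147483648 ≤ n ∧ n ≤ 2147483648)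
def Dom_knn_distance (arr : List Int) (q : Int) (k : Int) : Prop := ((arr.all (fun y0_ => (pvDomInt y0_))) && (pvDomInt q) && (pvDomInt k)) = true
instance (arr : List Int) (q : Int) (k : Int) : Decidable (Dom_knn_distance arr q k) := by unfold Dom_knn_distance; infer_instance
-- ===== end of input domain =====

-- B replaces A's full sort + index by a median-of-medians quickselect of the (k-1)-th order
-- statistic of the (distance, point) pairs; same return value on all of Pre_ (neither side mutates).

-- ===== PORT A =====
-- Python returns the tuple (kth_distance, kth_point); under the type convention it is the list [kth_distance, kth_point].
def knn_distance (arr : List Int) (q : Int) (k : Int) : List Int :=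
  let distances : List (Int × Int) :=
    arr.foldl (fun acc point => acc ++ [(|point - q|, point)]) []
  let ds := PySem.List.sorted2 distances (fun x => x.1) (fun x => x.2)
  let kth := PySem.List.pyGetD ds (k - 1) (0, 0)   -- distances[k-1]; Pre_ excludes the IndexError
  [kth.1, kth.2]

-- ===== PORT B =====
-- Python tuple comparison x < y on int pairs is lexicographic:
def pvLex (a b : Int × Int) : Bool := a.1 < b.1 || (a.1 == b.1 && a.2 < b.2)

-- the chunks [xs[j:j+5] for j in range(0, len(xs), 5)]
def pvChunks5 : List (Int × Int) → List (List (Int × Int))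
  | [] => []
  | x :: rest => ((x :: rest).take 5) :: pvChunks5 ((x :: rest).drop 5)
termination_by xs => xs.length
decreasing_by simp only [List.length_drop, List.length_cons]; omega

-- sorted(c)[len(c) // 2]: the median Python picks from a chunk (valid index whenever c ≠ [])
def pvMedian (c : List (Int × Int)) : Int × Int :=
  (PySem.List.sorted2 c (fun x => x.1) (fun x => x.2)).getD (c.length / 2) (0, 0)

lemma pvChunks5_length_le : ∀ (n : Nat) (xs : List (Int × Int)), xs.length ≤ 5 * n → (pvChunks5 xs).length ≤ n := by
  intro n
  induction n with
  | zero =>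
    intro xs h
    have : xs = [] := List.length_eq_zero_iff.mp (by omega)
    subst this
    simp [pvChunks5]
  | succ n ih =>
    intro xs h
    match xs with
    | [] => simp [pvChunks5]
    | x :: rest =>
      rw [pvChunks5]
      simp only [List.length_cons]
      have := ih ((x :: rest).drop 5) (by simp only [List.length_drop]; simp only [List.length_cons] at h ⊢; omega)
      omega

-- _pivot: while len(xs) > 5: xs = chunk medians; return sorted(xs)[len(xs)//2]
def pvPivot (xs : List (Int × Int)) : Int × Int :=
  if h : xs.length ≤ 5 then pvMedian xs
  else pvPivot ((pvChunks5 xs).map pvMedian)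
termination_by xs.length
decreasing_by
  rw [List.length_map]
  have h1 : (pvChunks5 xs).length ≤ xs.length - 1 :=
    pvChunks5_length_le (xs.length - 1) xs (by omega)
  omega

lemma pvMedian_mem (c : List (Int × Int)) (hc : c ≠ []) : pvMedian c ∈ c := by
  have hp : (PySem.List.sorted2 c (fun x : Int × Int => x.1) (fun x : Int × Int => x.2)).Perm c :=
    PySem.List.sorted2_perm c _ _ _
  have hlen : (PySem.List.sorted2 c (fun x : Int × Int => x.1) (fun x : Int × Int => x.2)).length = c.length :=
    hp.length_eq
  have hc1 : 0 < c.length := List.length_pos_of_ne_nil hc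
  have hidx : c.length / 2 < (PySem.List.sorted2 c (fun x : Int × Int => x.1) (fun x : Int × Int => x.2)).length := by
    rw [hlen]; omega
  rw [pvMedian, List.getD_eq_getElem _ _ hidx]
  exact hp.mem_iff.mp (List.getElem_mem hidx)

lemma pvChunks5_sound : ∀ (n : Nat) (xs : List (Int × Int)), xs.length ≤ n →
    ∀ c ∈ pvChunks5 xs, c ≠ [] ∧ ∀ y ∈ c, y ∈ xs := by
  intro n
  induction n with
  | zero =>
    intro xs h
    have : xs = [] := List.length_eq_zero_iff.mp (by omega)
    subst this
    simp [pvChunks5]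
  | succ n ih =>
    intro xs h c hc
    match xs with
    | [] => simp [pvChunks5] at hc
    | x :: rest =>
      rw [pvChunks5] at hc
      rcases List.mem_cons.mp hc with rfl | hmem
      · exact ⟨by simp, fun y hy => List.take_subset 5 _ hy⟩
      · obtain ⟨hne, hsub⟩ := ih ((x :: rest).drop 5)
          (by simp only [List.length_drop, List.length_cons]; simp only [List.length_cons] at h; omega) c hmem
        exact ⟨hne, fun y hy => List.drop_subset 5 _ (hsub y hy)⟩

lemma pvPivot_mem : ∀ (n : Nat) (xs : List (Int × Int)), xs.length ≤ n → xs ≠ [] → pvPivot xs ∈ xs := by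
  intro n
  induction n with
  | zero =>
    intro xs h hne
    exact absurd (List.length_eq_zero_iff.mp (by omega)) hne
  | succ n ih =>
    intro xs h hne
    rw [pvPivot]
    by_cases h5 : xs.length ≤ 5
    · rw [dif_pos h5]; exact pvMedian_mem xs hne
    · rw [dif_neg h5]
      have hchunks := pvChunks5_sound xs.length xs le_rfl
      have hlenm : ((pvChunks5 xs).map pvMedian).length ≤ n := by
        rw [List.length_map]
        have := pvChunks5_length_le (xs.length - 1) xs (by omega)
        omega
      have hnem : (pvChunks5 xs).map pvMedian ≠ [] := by
        match xs, hne with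
        | x :: rest, _ => rw [pvChunks5]; simp
      have hmem := ih ((pvChunks5 xs).map pvMedian) hlenm hnem
      obtain ⟨c, hc, heq⟩ := List.mem_map.mp hmem
      obtain ⟨hcne, hcsub⟩ := hchunks c hc
      exact hcsub _ (heq ▸ pvMedian_mem c hcne)

-- _quickselect: three-way partition around the median-of-medians pivot, loop into the side holding index i
def pvQsel : List (Int × Int) → Int → Int × Int
  | [], _ => (0, 0)   -- Python raises IndexError here (xs[len(xs)//2] inside _pivot); unreachable under Pre_
  | x :: rest, i =>
    let pivot := pvPivot (x :: rest)
    let lt := (x :: rest).filter (fun y => pvLex y pivot)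
    let gt := (x :: rest).filter (fun y => pvLex pivot y)
    if i < (lt.length : Int) then pvQsel lt i
    else if i < ((x :: rest).length : Int) - (gt.length : Int) then pivot
    else pvQsel gt (i - (((x :: rest).length : Int) - (gt.length : Int)))
termination_by xs _ => xs.length
decreasing_by
  · exact List.length_filter_lt_length_iff_exists.mpr
      ⟨pvPivot (x :: rest), pvPivot_mem (x :: rest).length (x :: rest) le_rfl (by simp), by simp [pvLex]⟩
  · exact List.length_filter_lt_length_iff_exists.mpr
      ⟨pvPivot (x :: rest), pvPivot_mem (x :: rest).length (x :: rest) le_rfl (by simp), by simp [pvLex]⟩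

def knn_distance_alt (arr : List Int) (q : Int) (k : Int) : List Int :=
  let pairs := arr.map (fun point => (|point - q|, point))
  let r := pvQsel pairs (k - 1)
  [r.1, r.2]

-- ===== PRECONDITION & SPEC =====
-- Pre_ admits 1 ≤ k ≤ len(arr). It excludes k out of range above, where both programs raise
-- IndexError, and k ≤ 0 with -len(arr) ≤ k-1, where A returns an element only through Python's
-- accidental negative-index wraparound into the sorted list and the natural quickselect B raises
-- IndexError (see claim.json cites).
def Pre_knn_distance (arr : List Int) (q : Int) (k : Int) : Prop :=
  1 ≤ k ∧ k ≤ arr.length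
instance (arr : List Int) (q : Int) (k : Int) : Decidable (Pre_knn_distance arr q k) := by
  unfold Pre_knn_distance; infer_instance

def pvWitness_knn_distance : List Int × Int × Int := ([1, 3, 5], 2, 2)

def Spec_knn_distance (arr : List Int) (q : Int) (k : Int) (out : List Int) : Prop := out = knn_distance_alt arr q k
instance (arr : List Int) (q : Int) (k : Int) (out : List Int) : Decidable (Spec_knn_distance arr q k out) := by unfold Spec_knn_distance; infer_instance

-- ===== CLAIM (what is proved, stated in full; the proofs are below) =====
def Claim_equal_knn_distance : Prop := ∀ (arr : List Int) (q : Int) (k : Int), Dom_knn_distance arr q k → Pre_knn_distance arr q k → Spec_knn_distance arr q k (knn_distance arr q k)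

-- ===== LEMMAS AND PROOFS =====

-- the lexicographic key Python's tuple sort / tuple comparison uses
def pvKey (x : Int × Int) : Lex (Int × Int) := toLex x

-- A's sort of the pair list, named for the proofs
def pvSort (xs : List (Int × Int)) : List (Int × Int) :=
  PySem.List.sorted2 xs (fun x => x.1) (fun x => x.2)

lemma pvLex_iff (a b : Int × Int) : pvLex a b = true ↔ pvKey a < pvKey b := by
  simp [pvLex, pvKey, Prod.Lex.lt_iff]

lemma pvSort_perm (xs : List (Int × Int)) : (pvSort xs).Perm xs :=
  PySem.List.sorted2_perm xs _ _ _

lemma pvSort_eq_foldl (xs : List (Int × Int)) :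
    pvSort xs = xs.foldl (fun acc x => PySem.List.insertBy (fun a b => decide (pvKey a < pvKey b)) x acc) [] := by
  have hfun : (fun (a b : Int × Int) => (decide (a.1 < b.1) || (!decide (b.1 < a.1) && decide (a.2 < b.2))))
      = (fun a b => decide (pvKey a < pvKey b)) := by
    funext a b
    rw [Bool.eq_iff_iff]
    simp [pvKey, Prod.Lex.lt_iff]
    omega
  simp only [pvSort, PySem.List.sorted2, hfun]
  rfl

lemma pvSort_pairwise (xs : List (Int × Int)) :
    (pvSort xs).Pairwise (fun a b => pvKey a ≤ pvKey b) := by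
  rw [pvSort_eq_foldl]
  have aux : ∀ (l : List (Int × Int)) (acc : List (Int × Int)),
      acc.Pairwise (fun a b => pvKey a ≤ pvKey b) →
      (l.foldl (fun acc x => PySem.List.insertBy (fun a b => decide (pvKey a < pvKey b)) x acc) acc).Pairwise
        (fun a b => pvKey a ≤ pvKey b) := by
    intro l
    induction l with
    | nil => intro acc h; simpa using h
    | cons x t ih =>
      intro acc h
      exact ih _ (PySem.List.insertBy_pairwise_le pvKey x acc h)
  exact aux xs [] (by simp)

-- two key-sorted permutations of the same pair list are equal (lex order is antisymmetric)
lemma pv_unique {l₁ l₂ : List (Int × Int)} (hp : l₁.Perm l₂)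
    (h₁ : l₁.Pairwise (fun a b => pvKey a ≤ pvKey b))
    (h₂ : l₂.Pairwise (fun a b => pvKey a ≤ pvKey b)) : l₁ = l₂ := by
  refine hp.eq_of_pairwise (fun a b _ _ hab hba => ?_) h₁ h₂
  have h : pvKey a = pvKey b := le_antisymm hab hba
  simpa [pvKey, toLex] using h

lemma pv_cases (a b : Int × Int) :
    (pvLex a b = true ∧ (a == b) = false ∧ pvLex b a = false) ∨
    ((pvLex a b = false ∧ (a == b) = true ∧ pvLex b a = false) ∨
     (pvLex a b = false ∧ (a == b) = false ∧ pvLex b a = true)) := by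
  obtain ⟨a1, a2⟩ := a; obtain ⟨b1, b2⟩ := b
  simp [pvLex, Prod.ext_iff]
  omega

-- the three pivot filters partition the list (any pivot value p)
lemma pv_tri_perm (xs : List (Int × Int)) (p : Int × Int) :
    xs.Perm (xs.filter (fun x => pvLex x p) ++ xs.filter (fun x => x == p) ++ xs.filter (fun x => pvLex p x)) := by
  induction xs with
  | nil => simp
  | cons x t ih =>
    rcases pv_cases x p with ⟨h1, h2, h3⟩ | ⟨h1, h2, h3⟩ | ⟨h1, h2, h3⟩
    · simpa [List.filter_cons, h1, h2, h3] using ih.cons x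
    · simp only [List.filter_cons, h1, h2, h3, if_pos, if_neg, Bool.false_eq_true, not_false_iff]
      refine (ih.cons x).trans ?_
      simp only [List.append_assoc, List.cons_append]
      exact List.perm_middle.symm
    · simp only [List.filter_cons, h1, h2, h3, Bool.false_eq_true]
      refine (ih.cons x).trans ?_
      have := @List.perm_middle _ x (t.filter (fun x => pvLex x p) ++ t.filter (fun x => x == p)) (t.filter (fun x => pvLex p x))
      simp only [List.append_assoc] at this ⊢
      exact this.symm

lemma mem_eqs_eq {xs : List (Int × Int)} {p x : Int × Int}
    (h : x ∈ xs.filter (fun x => x == p)) : x = p := by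
  simp only [List.mem_filter, beq_iff_eq] at h
  exact h.2

-- sorting commutes with the pivot partition (any pivot value p)
lemma pvSort_decomp (p : Int × Int) (xs : List (Int × Int)) :
    pvSort xs =
      pvSort (xs.filter (fun x => pvLex x p)) ++
      xs.filter (fun x => x == p) ++
      pvSort (xs.filter (fun x => pvLex p x)) := by
  set A := xs.filter (fun x => pvLex x p)
  set B := xs.filter (fun x => x == p)
  set C := xs.filter (fun x => pvLex p x)
  have hmemA : ∀ a ∈ pvSort A, pvKey a < pvKey p := by
    intro a ha
    have hm : a ∈ A := (pvSort_perm A).mem_iff.mp ha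
    have : pvLex a p = true := (List.mem_filter.mp hm).2
    exact (pvLex_iff a p).mp this
  have hmemC : ∀ a ∈ pvSort C, pvKey p < pvKey a := by
    intro a ha
    have hm : a ∈ C := (pvSort_perm C).mem_iff.mp ha
    have : pvLex p a = true := (List.mem_filter.mp hm).2
    exact (pvLex_iff p a).mp this
  have hmemB : ∀ a ∈ B, a = p := fun a ha => mem_eqs_eq ha
  refine pv_unique ?_ (pvSort_pairwise xs) ?_
  · refine (pvSort_perm xs).trans ((pv_tri_perm xs p).trans ?_)
    exact (((pvSort_perm A).symm.append (List.Perm.refl B)).append (pvSort_perm C).symm)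
  · rw [List.pairwise_append, List.pairwise_append]
    refine ⟨⟨pvSort_pairwise A, ?_, ?_⟩, pvSort_pairwise C, ?_⟩
    · refine List.pairwise_of_forall_mem_list ?_
      intro a ha b hb
      rw [hmemB a ha, hmemB b hb]
    · intro a ha b hb
      have := hmemA a ha
      rw [hmemB b hb]
      exact le_of_lt this
    · intro a ha b hb
      rcases List.mem_append.mp ha with h | h
      · exact le_of_lt ((hmemA a h).trans (hmemC b hb))
      · rw [hmemB a h]; exact le_of_lt (hmemC b hb)

lemma const_getElem? {l : List (Int × Int)} {p : Int × Int} (h : ∀ x ∈ l, x = p)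
    {j : Nat} (hj : j < l.length) : l[j]? = some p := by
  rw [List.getElem?_eq_getElem hj]
  exact congrArg some (h _ (List.getElem_mem hj))

-- quickselect returns exactly the i-th element of A's sorted list (for an in-range index)
lemma pvQsel_correct : ∀ (n : Nat) (xs : List (Int × Int)) (i : Int), xs.length ≤ n → 0 ≤ i → i < (xs.length : Int) →
    some (pvQsel xs i) = (pvSort xs)[i.toNat]? := by
  intro n
  induction n with
  | zero => intro xs i h h0 hi; omega
  | succ n ih =>
    intro xs i h h0 hi
    match xs with
    | [] => simp only [List.length_nil, Int.natCast_zero] at hi; omega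
    | x :: rest =>
      have hpmem : pvPivot (x :: rest) ∈ x :: rest :=
        pvPivot_mem (x :: rest).length (x :: rest) le_rfl (by simp)
      set p := pvPivot (x :: rest) with hp
      have hlenA : ((x :: rest).filter (fun y => pvLex y p)).length < (x :: rest).length :=
        List.length_filter_lt_length_iff_exists.mpr ⟨p, hpmem, by simp [pvLex]⟩
      have hlenC : ((x :: rest).filter (fun y => pvLex p y)).length < (x :: rest).length :=
        List.length_filter_lt_length_iff_exists.mpr ⟨p, hpmem, by simp [pvLex]⟩
      have hsum : (x :: rest).length = ((x :: rest).filter (fun y => pvLex y p)).length +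
          ((x :: rest).filter (fun y => y == p)).length + ((x :: rest).filter (fun y => pvLex p y)).length := by
        have := (pv_tri_perm (x :: rest) p).length_eq
        simp only [List.length_append] at this
        omega
      have hSA : (pvSort ((x :: rest).filter (fun y => pvLex y p))).length =
          ((x :: rest).filter (fun y => pvLex y p)).length :=
        (pvSort_perm _).length_eq
      have hSC : (pvSort ((x :: rest).filter (fun y => pvLex p y))).length =
          ((x :: rest).filter (fun y => pvLex p y)).length :=
        (pvSort_perm _).length_eq
      rw [pvQsel, ← hp, pvSort_decomp p]
      by_cases h1 : i < (((x :: rest).filter (fun y => pvLex y p)).length : Int)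
      · rw [if_pos h1]
        rw [List.getElem?_append_left (by simp only [List.length_append, hSA]; omega),
            List.getElem?_append_left (by simp only [hSA]; omega)]
        exact ih _ i (by omega) h0 h1
      · rw [if_neg h1]
        by_cases h2 : i < (((x :: rest).length : Nat) : Int) -
            (((x :: rest).filter (fun y => pvLex p y)).length : Int)
        · rw [if_pos h2]
          rw [List.getElem?_append_left (by simp only [List.length_append, hSA]; omega),
              List.getElem?_append_right (by simp only [hSA]; omega)]
          rw [hSA]
          exact (const_getElem? (fun y hy => mem_eqs_eq hy) (by omega)).symm
        · rw [if_neg h2]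
          rw [List.getElem?_append_right (by simp only [List.length_append, hSA]; omega)]
          have hrec := ih ((x :: rest).filter (fun y => pvLex p y))
            (i - ((((x :: rest).length : Nat) : Int) - (((x :: rest).filter (fun y => pvLex p y)).length : Int)))
            (by simp only [List.length_cons] at h hi hsum hlenA hlenC ⊢; omega)
            (by omega)
            (by simp only [List.length_cons] at h hi hsum hlenA hlenC ⊢; omega)
          have hcast : (i - ((((x :: rest).length : Nat) : Int) -
              (((x :: rest).filter (fun y => pvLex p y)).length : Int))).toNat =
              i.toNat - (pvSort ((x :: rest).filter (fun y => pvLex y p)) ++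
                (x :: rest).filter (fun y => y == p)).length := by
            simp only [List.length_append, hSA]; omega
          rw [← hcast]
          exact hrec

-- ===== VERDICT (by name: the statement is the Claim_ definition above) =====
theorem knn_distance_spec : Claim_equal_knn_distance := by
  intro arr q k _ hpre
  obtain ⟨hlo, hhi⟩ := hpre
  unfold Spec_knn_distance knn_distance knn_distance_alt
  simp only [PySem.List.foldl_append_singleton_eq_map, List.nil_append]
  set pairs := arr.map (fun point => (|point - q|, point)) with hpairs
  have hplen : pairs.length = arr.length := by simp [hpairs]
  have hslen : (pvSort pairs).length = arr.length := (pvSort_perm pairs).length_eq.trans hplen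
  have hqc := pvQsel_correct pairs.length pairs (k - 1) le_rfl (by omega) (by rw [hplen]; omega)
  have hidx : PySem.List.pyIdx? (pvSort pairs).length (k - 1) = some (k - 1).toNat := by
    simp only [PySem.List.pyIdx?, hslen]
    split_ifs
    all_goals try omega
    all_goals rfl
  have hval : PySem.List.pyGetD (pvSort pairs) (k - 1) ((0 : Int), (0 : Int)) = pvQsel pairs (k - 1) := by
    simp only [PySem.List.pyGetD, PySem.List.pyGet?, hidx, Option.bind_some, ← hqc, Option.getD_some]
  show [(PySem.List.pyGetD (pvSort pairs) (k - 1) ((0 : Int), (0 : Int))).1,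
        (PySem.List.pyGetD (pvSort pairs) (k - 1) ((0 : Int), (0 : Int))).2] =
       [(pvQsel pairs (k - 1)).1, (pvQsel pairs (k - 1)).2]
  rw [hval]
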